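-- pv_equiv track=rewrite | github.com/adn770/nhc | nhc/rendering/ir_emitter.py | _coalesce_north_edges
-- ===== SOURCE A (Python) =====
-- def _coalesce_north_edges(
--     norths: set[tuple[int, int]],
-- ) -> list[tuple[int, int, int, int]]:
--     """Merge consecutive north edges at the same y into one span.
--
--     Mirrors building.py:_coalesce_north_edges. Output runs are
--     ``(x0, y, end + 1, y)`` in tile-boundary coords.
--     """
--     runs: list[tuple[int, int, int, int]] = []
--     seen: set[tuple[int, int]] = set()
--     for (x, y) in sorted(norths):
--         if (x, y) in seen:
--             continue
--         end = x
--         while (end + 1, y) in norths: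
--             end += 1
--         for ix in range(x, end + 1):
--             seen.add((ix, y))
--         runs.append((x, y, end + 1, y))
--     return runs
-- ===== SOURCE B (Python) =====
-- def _run_end(pts, x, y):
--     end = x
--     while (end + 1, y) in pts:
--         end += 1
--     return end
--
--
-- def _coalesce_north_edges(
--     norths: set[tuple[int, int]],
-- ) -> list[tuple[int, int, int, int]]:
--     """Merge consecutive north edges at the same y into one span.
--
--     A point (x, y) starts a run exactly when (x - 1, y) is absent, so
--     emit one span per run start and sort the spans by (x0, y) at the end.
--     """
--     pts = set(norths)
--     runs = [
--         (x, y, _run_end(pts, x, y) + 1, y)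
--         for (x, y) in pts
--         if (x - 1, y) not in pts
--     ]
--     return sorted(runs, key=lambda r: (r[0], r[1]))
-- ===== Notes on version B (the rewrite author's own statement) =====
-- stated objective: alternative
-- what changed: Replaced A's sorted traversal with a mutable 'seen' set and skip bookkeeping by a stateless run-start test ((x-1,y) not in the set) that emits one span per run start from a comprehension, sorting the spans once at the end.
import Mathlib
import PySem

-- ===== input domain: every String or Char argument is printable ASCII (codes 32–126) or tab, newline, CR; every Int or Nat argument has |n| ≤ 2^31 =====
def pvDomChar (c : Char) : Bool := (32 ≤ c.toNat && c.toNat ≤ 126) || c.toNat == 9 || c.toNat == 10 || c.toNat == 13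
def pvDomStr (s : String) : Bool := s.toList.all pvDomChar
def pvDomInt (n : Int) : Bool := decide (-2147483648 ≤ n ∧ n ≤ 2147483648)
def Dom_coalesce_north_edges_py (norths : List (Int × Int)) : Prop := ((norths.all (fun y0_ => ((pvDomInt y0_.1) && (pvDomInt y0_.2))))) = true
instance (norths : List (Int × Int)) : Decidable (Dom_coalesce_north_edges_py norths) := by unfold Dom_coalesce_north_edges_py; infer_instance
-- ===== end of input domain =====

-- B replaces A's sorted traversal with a 'seen' set by a stateless run-start test plus one final sort (alternative decomposition, same result).

-- ===== PORT A =====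
-- A's 'while (end + 1, y) in norths: end += 1' loop; the fuel argument only bounds the
-- recursion, and fuel = norths.length is never exhausted before the loop's own exit
-- condition fires (pyEndA_succ_not_mem below), so this is the exact while loop.
def pyEndA (norths : List (Int × Int)) (y : Int) (e : Int) : Nat → Int
  | 0 => e
  | fuel + 1 => if (e + 1, y) ∈ norths then pyEndA norths y (e + 1) fuel else e

def coalesce_north_edges_py (norths : List (Int × Int)) : List (Int × Int × Int × Int) :=
  ((PySem.List.sorted2 norths (fun p => p.1) (fun p => p.2) false).foldl
    (fun (st : List (Int × Int × Int × Int) × PySem.Set (Int × Int)) p =>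
      if p ∈ st.2 then st
      else
        let e := pyEndA norths p.2 p.1 norths.length
        ((st.1 ++ [(p.1, p.2, e + 1, p.2)]),
         (PySem.List.pyRange p.1 (e + 1) 1).foldl (fun s ix => PySem.Set.add s (ix, p.2)) st.2))
    ([], PySem.Set.empty)).1

-- ===== PORT B =====
-- Source B's helper _run_end: the same while loop on the set pts (fuel as for pyEndA)
def runEndB (pts : List (Int × Int)) (y : Int) (e : Int) : Nat → Int
  | 0 => e
  | fuel + 1 => if (e + 1, y) ∈ pts then runEndB pts y (e + 1) fuel else e

def coalesce_north_edges_py_alt (norths : List (Int × Int)) : List (Int × Int × Int × Int) :=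
  let pts : PySem.Set (Int × Int) := PySem.Set.ofList norths
  let runs := (pts.filter (fun p => decide ((p.1 - 1, p.2) ∉ pts))).map
      (fun p => (p.1, p.2, runEndB pts p.2 p.1 pts.length + 1, p.2))
  PySem.List.sorted2 runs (fun r => r.1) (fun r => r.2.1) false

-- ===== PRECONDITION & SPEC =====
def Spec_coalesce_north_edges_py (norths : List (Int × Int)) (out : List (Int × Int × Int × Int)) : Prop := out = coalesce_north_edges_py_alt norths
instance (norths : List (Int × Int)) (out : List (Int × Int × Int × Int)) : Decidable (Spec_coalesce_north_edges_py norths out) := by unfold Spec_coalesce_north_edges_py; infer_instance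

-- ===== CLAIM (what is proved, stated in full; the proofs are below) =====
def Claim_equal_coalesce_north_edges_py : Prop := ∀ (norths : List (Int × Int)), Dom_coalesce_north_edges_py norths → Spec_coalesce_north_edges_py norths (coalesce_north_edges_py norths)

-- ===== LEMMAS AND PROOFS =====

theorem pv_sorted2_eq_sorted_lex {α : Type} (xs : List α) (k1 k2 : α → Int) :
    PySem.List.sorted2 xs k1 k2 false
      = PySem.List.sorted xs (fun a => toLex (k1 a, k2 a)) false := by
  unfold PySem.List.sorted2 PySem.List.sorted
  have h : (fun (a b : α) => decide (k1 a < k1 b) || (!decide (k1 b < k1 a) && decide (k2 a < k2 b)))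
      = (fun (a b : α) => decide ((toLex (k1 a, k2 a)) < toLex (k1 b, k2 b))) := by
    funext a b
    simp only [← decide_not, ← Bool.decide_and, ← Bool.decide_or]
    rw [decide_eq_decide, Prod.Lex.lt_iff]
    simp only [ofLex_toLex]
    omega
  simp only [Bool.false_eq_true, if_false]
  rw [h]

theorem pv_sorted2_pairwise {α : Type} (xs : List α) (k1 k2 : α → Int) :
    (PySem.List.sorted2 xs k1 k2 false).Pairwise
      (fun a b => k1 a < k1 b ∨ (k1 a = k1 b ∧ k2 a ≤ k2 b)) := by
  rw [pv_sorted2_eq_sorted_lex]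
  have := PySem.List.sorted_pairwise xs (fun a => toLex (k1 a, k2 a))
  refine this.imp ?_
  intro a b hab
  rw [Prod.Lex.le_iff] at hab
  simpa using hab

theorem pv_sorted2_eq_of_perm_of_pairwise {α : Type} (xs ys : List α) (k1 k2 : α → Int)
    (hp : ys.Perm xs)
    (hpw : ys.Pairwise (fun a b => k1 a < k1 b ∨ (k1 a = k1 b ∧ k2 a < k2 b))) :
    PySem.List.sorted2 xs k1 k2 false = ys := by
  rw [pv_sorted2_eq_sorted_lex]
  refine PySem.List.sorted_eq_of_perm_of_pairwise_lt xs ys _ hp ?_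
  refine hpw.imp ?_
  intro a b hab
  rw [Prod.Lex.lt_iff]
  simpa using hab

theorem pv_discard_sublist {α : Type} [BEq α] (s : PySem.Set α) (x : α) :
    (PySem.Set.discard s x).Sublist s := by
  simp only [PySem.Set.discard]
  exact List.filter_sublist (l := s) (p := fun y => !(y == x))

theorem pv_ofList_sublist {α : Type} [BEq α] [LawfulBEq α] (xs : List α) :
    (PySem.Set.ofList xs).Sublist xs := by
  induction xs with
  | nil => simp [PySem.Set.ofList]
  | cons x xs ih =>
      rw [PySem.Set.ofList_cons]
      exact List.Sublist.cons₂ x ((pv_discard_sublist _ x).trans ih)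

theorem pyEndA_ge (S : List (Int × Int)) (y : Int) (fuel : Nat) :
    ∀ e : Int, e ≤ pyEndA S y e fuel := by
  induction fuel with
  | zero => intro e; simp [pyEndA]
  | succ n ih =>
      intro e
      rw [pyEndA]
      split
      · exact le_trans (by omega) (ih (e + 1))
      · exact le_refl e

theorem pyEndA_chain (S : List (Int × Int)) (y : Int) (fuel : Nat) :
    ∀ e t : Int, e < t → t ≤ pyEndA S y e fuel → (t, y) ∈ S := by
  induction fuel with
  | zero => intro e t h1 h2; simp [pyEndA] at h2; omega
  | succ n ih =>
      intro e t h1 h2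
      rw [pyEndA] at h2
      split at h2
      · rcases eq_or_lt_of_le (show e + 1 ≤ t by omega) with heq | hlt
        · rwa [← heq]
        · exact ih (e + 1) t hlt h2
      · omega

theorem pyEndA_le (S : List (Int × Int)) (y : Int) (fuel : Nat) :
    ∀ e : Int, pyEndA S y e fuel ≤ e + fuel := by
  induction fuel with
  | zero => intro e; simp [pyEndA]
  | succ n ih =>
      intro e
      rw [pyEndA]
      split
      · have := ih (e + 1); omega
      · omega

theorem pyEndA_stop (S : List (Int × Int)) (y : Int) (fuel : Nat) :
    ∀ e : Int, pyEndA S y e fuel < e + fuel → (pyEndA S y e fuel + 1, y) ∉ S := by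
  induction fuel with
  | zero => intro e h; simp [pyEndA] at h
  | succ n ih =>
      intro e h
      rw [pyEndA] at h ⊢
      split at h
      · rename_i hm
        rw [if_pos hm]
        exact ih (e + 1) (by omega)
      · rename_i hm
        rw [if_neg hm]
        exact hm

theorem pyEndA_succ_not_mem (S : List (Int × Int)) (x y : Int) (h : (x, y) ∈ S) :
    (pyEndA S y x S.length + 1, y) ∉ S := by
  rcases lt_or_ge (pyEndA S y x S.length) (x + S.length) with hlt | hge
  · exact pyEndA_stop S y S.length x hlt
  · exfalso
    have he : pyEndA S y x S.length = x + S.length := le_antisymm (pyEndA_le S y S.length x) hge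
    set e := pyEndA S y x S.length with hedef
    have hsub : ((PySem.List.pyRange x (e + 1) 1).map (fun t => (t, y))) ⊆ S := by
      intro q hq
      simp only [List.mem_map, PySem.List.mem_pyRange_one] at hq
      obtain ⟨t, ⟨ht1, ht2⟩, rfl⟩ := hq
      rcases eq_or_lt_of_le ht1 with heq | hlt
      · rwa [← heq]
      · exact pyEndA_chain S y S.length x t hlt (by omega)
    have hnd : ((PySem.List.pyRange x (e + 1) 1).map (fun t => (t, y))).Nodup := by
      refine List.Nodup.map ?_ (PySem.List.nodup_pyRange_one x (e + 1))
      intro a b hab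
      simpa using hab
    have := (List.subperm_of_subset hnd hsub).length_le
    rw [List.length_map, PySem.List.length_pyRange_one] at this
    have hx : x ≤ e := pyEndA_ge S y S.length x
    omega

theorem pyEndA_unique (S : List (Int × Int)) (x y e : Int) (h : (x, y) ∈ S)
    (h1 : x ≤ e) (h2 : ∀ t, x < t → t ≤ e → (t, y) ∈ S) (h3 : (e + 1, y) ∉ S) :
    pyEndA S y x S.length = e := by
  set e' := pyEndA S y x S.length with hedef
  have hx : x ≤ e' := pyEndA_ge S y S.length x
  rcases lt_trichotomy e' e with hlt | heq | hgt
  · exact absurd (h2 (e' + 1) (by omega) (by omega)) (pyEndA_succ_not_mem S x y h)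
  · exact heq
  · exact absurd (pyEndA_chain S y S.length x (e + 1) (by omega) (by omega)) h3

theorem runEndB_eq (pts : List (Int × Int)) (y : Int) (fuel : Nat) :
    ∀ e : Int, runEndB pts y e fuel = pyEndA pts y e fuel := by
  induction fuel with
  | zero => intro e; rfl
  | succ n ih => intro e; rw [runEndB, pyEndA, ih]

theorem runEndB_eq_pyEndA (S : List (Int × Int)) (x y : Int) (h : (x, y) ∈ S) :
    runEndB (PySem.Set.ofList S) y x (PySem.Set.ofList S).length = pyEndA S y x S.length := by
  rw [runEndB_eq]
  have hmem : ∀ q : Int × Int, q ∈ PySem.Set.ofList S ↔ q ∈ S := fun q => PySem.Set.mem_ofList S q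
  have h' : (x, y) ∈ PySem.Set.ofList S := (hmem _).mpr h
  have hx := pyEndA_ge (PySem.Set.ofList S) y (PySem.Set.ofList S).length x
  refine (pyEndA_unique S x y _ h hx ?_ ?_).symm
  · intro t h1 h2
    exact (hmem _).mp (pyEndA_chain _ y _ x t h1 h2)
  · intro hc
    exact pyEndA_succ_not_mem (PySem.Set.ofList S) x y h' ((hmem _).mpr hc)

def pvDesc (S : List (Int × Int)) (y : Int) (e : Int) : Nat → Int
  | 0 => e
  | fuel + 1 => if (e - 1, y) ∈ S then pvDesc S y (e - 1) fuel else e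

theorem pvDesc_le (S : List (Int × Int)) (y : Int) (fuel : Nat) :
    ∀ e : Int, pvDesc S y e fuel ≤ e := by
  induction fuel with
  | zero => intro e; simp [pvDesc]
  | succ n ih =>
      intro e
      rw [pvDesc]
      split
      · exact le_trans (ih (e - 1)) (by omega)
      · exact le_refl e

theorem pvDesc_ge (S : List (Int × Int)) (y : Int) (fuel : Nat) :
    ∀ e : Int, e - fuel ≤ pvDesc S y e fuel := by
  induction fuel with
  | zero => intro e; simp [pvDesc]
  | succ n ih =>
      intro e
      rw [pvDesc]
      split
      · have := ih (e - 1); omega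
      · omega

theorem pvDesc_chain (S : List (Int × Int)) (y : Int) (fuel : Nat) :
    ∀ e t : Int, pvDesc S y e fuel ≤ t → t < e → (t, y) ∈ S := by
  induction fuel with
  | zero => intro e t h1 h2; simp [pvDesc] at h1; omega
  | succ n ih =>
      intro e t h1 h2
      rw [pvDesc] at h1
      split at h1
      · rename_i hm
        rcases eq_or_lt_of_le (show t ≤ e - 1 by omega) with heq | hlt
        · rwa [heq]
        · exact ih (e - 1) t h1 (by omega)
      · omega

theorem pvDesc_stop (S : List (Int × Int)) (y : Int) (fuel : Nat) :
    ∀ e : Int, e - fuel < pvDesc S y e fuel → (pvDesc S y e fuel - 1, y) ∉ S := by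
  induction fuel with
  | zero => intro e h; simp [pvDesc] at h
  | succ n ih =>
      intro e h
      rw [pvDesc] at h ⊢
      split at h
      · rename_i hm
        rw [if_pos hm]
        exact ih (e - 1) (by omega)
      · rename_i hm
        rw [if_neg hm]
        exact hm

theorem pvDesc_pred_not_mem (S : List (Int × Int)) (x y : Int) (h : (x, y) ∈ S) :
    (pvDesc S y x S.length - 1, y) ∉ S := by
  rcases lt_or_ge (x - S.length) (pvDesc S y x S.length) with hlt | hge
  · exact pvDesc_stop S y S.length x hlt
  · exfalso
    have hge' := pvDesc_ge S y S.length x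
    have he : pvDesc S y x S.length = x - S.length := by omega
    set d := pvDesc S y x S.length with hddef
    have hsub : ((PySem.List.pyRange d (x + 1) 1).map (fun t => (t, y))) ⊆ S := by
      intro q hq
      simp only [List.mem_map, PySem.List.mem_pyRange_one] at hq
      obtain ⟨t, ⟨ht1, ht2⟩, rfl⟩ := hq
      rcases eq_or_lt_of_le (show t ≤ x by omega) with heq | hlt
      · rwa [heq]
      · exact pvDesc_chain S y S.length x t ht1 hlt
    have hnd : ((PySem.List.pyRange d (x + 1) 1).map (fun t => (t, y))).Nodup := by
      refine List.Nodup.map ?_ (PySem.List.nodup_pyRange_one d (x + 1))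
      intro a b hab
      simpa using hab
    have := (List.subperm_of_subset hnd hsub).length_le
    rw [List.length_map, PySem.List.length_pyRange_one] at this
    omega

theorem pv_exists_start (S : List (Int × Int)) (x y : Int) (h : (x, y) ∈ S) :
    ∃ x0 : Int, x0 ≤ x ∧ (∀ t, x0 ≤ t → t ≤ x → (t, y) ∈ S) ∧ (x0 - 1, y) ∉ S := by
  refine ⟨pvDesc S y x S.length, pvDesc_le S y S.length x, ?_, pvDesc_pred_not_mem S x y h⟩
  intro t h1 h2
  rcases eq_or_lt_of_le h2 with heq | hlt
  · rwa [heq]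
  · exact pvDesc_chain S y S.length x t h1 hlt

abbrev pvGood (S : List (Int × Int)) (p : Int × Int) : Prop := (p.1 - 1, p.2) ∉ S

def pvRun (S : List (Int × Int)) (p : Int × Int) : Int × Int × Int × Int :=
  (p.1, p.2, pyEndA S p.2 p.1 S.length + 1, p.2)

def pvCov (S P : List (Int × Int)) (q : Int × Int) : Prop :=
  ∃ p ∈ P, pvGood S p ∧ p.2 = q.2 ∧ p.1 ≤ q.1 ∧ q.1 ≤ pyEndA S p.2 p.1 S.length

def pvLexLe (p q : Int × Int) : Prop := p.1 < q.1 ∨ (p.1 = q.1 ∧ p.2 ≤ q.2)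

theorem pvCov_append_singleton (S P : List (Int × Int)) (p q : Int × Int) :
    pvCov S (P ++ [p]) q ↔
      pvCov S P q ∨ (pvGood S p ∧ p.2 = q.2 ∧ p.1 ≤ q.1 ∧ q.1 ≤ pyEndA S p.2 p.1 S.length) := by
  unfold pvCov
  constructor
  · rintro ⟨r, hr, hrest⟩
    rcases List.mem_append.mp hr with h | h
    · exact Or.inl ⟨r, h, hrest⟩
    · simp only [List.mem_singleton] at h
      subst h; exact Or.inr hrest
  · rintro (⟨r, hr, hrest⟩ | hrest)
    · exact ⟨r, List.mem_append.mpr (Or.inl hr), hrest⟩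
    · exact ⟨p, List.mem_append.mpr (Or.inr (by simp)), hrest⟩

theorem pv_dedup_append_singleton (P : List (Int × Int)) (p : Int × Int) :
    PySem.List.dedup (P ++ [p]) =
      if p ∈ P then PySem.List.dedup P else PySem.List.dedup P ++ [p] := by
  simp only [PySem.List.dedup_eq_ofList, PySem.Set.ofList_append_singleton,
    PySem.Set.add_eq_ite, PySem.Set.mem_ofList]

-- covered prefix invariant for A's left fold over the lexicographically sorted list
theorem pv_foldA_inv (S : List (Int × Int)) :
    ∀ (M P : List (Int × Int)) (runs : List (Int × Int × Int × Int)) (seen : PySem.Set (Int × Int)),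
    (∀ p ∈ M, p ∈ S) →
    (∀ p ∈ P, p ∈ S) →
    (∀ q ∈ S, q ∈ P ∨ q ∈ M) →
    (∀ p ∈ P, ∀ q ∈ M, pvLexLe p q) →
    M.Pairwise pvLexLe →
    (∀ q : Int × Int, q ∈ seen ↔ pvCov S P q) →
    runs = ((PySem.List.dedup P).filter (fun p => decide (pvGood S p))).map (pvRun S) →
    (M.foldl
      (fun (st : List (Int × Int × Int × Int) × PySem.Set (Int × Int)) p =>
        if p ∈ st.2 then st
        else
          let e := pyEndA S p.2 p.1 S.length
          ((st.1 ++ [(p.1, p.2, e + 1, p.2)]),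
           (PySem.List.pyRange p.1 (e + 1) 1).foldl (fun s ix => PySem.Set.add s (ix, p.2)) st.2))
      (runs, seen)).1
      = ((PySem.List.dedup (P ++ M)).filter (fun p => decide (pvGood S p))).map (pvRun S) := by
  intro M
  induction M with
  | nil =>
      intro P runs seen _ _ _ _ _ _ hruns
      simpa using hruns
  | cons p M' ih =>
      intro P runs seen hM hP hPM hord hpw hseen hruns
      rw [List.foldl_cons]
      have hpS : p ∈ S := hM p (by simp)
      have hM' : ∀ r ∈ M', r ∈ S := fun r hr => hM r (by simp [hr])
      have hP' : ∀ r ∈ P ++ [p], r ∈ S := by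
        intro r hr
        rcases List.mem_append.mp hr with h | h
        · exact hP r h
        · simp only [List.mem_singleton] at h; subst h; exact hpS
      have hPM' : ∀ q ∈ S, q ∈ P ++ [p] ∨ q ∈ M' := by
        intro q hq
        rcases hPM q hq with h | h
        · exact Or.inl (List.mem_append.mpr (Or.inl h))
        · rcases List.mem_cons.mp h with h | h
          · exact Or.inl (List.mem_append.mpr (Or.inr (by simp [h])))
          · exact Or.inr h
      have hord' : ∀ r ∈ P ++ [p], ∀ q ∈ M', pvLexLe r q := by
        intro r hr q hq
        rcases List.mem_append.mp hr with h | h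
        · exact hord r h q (by simp [hq])
        · simp only [List.mem_singleton] at h; subst h
          exact (List.pairwise_cons.mp hpw).1 q hq
      have hpw' : M'.Pairwise pvLexLe := (List.pairwise_cons.mp hpw).2
      have happend : P ++ p :: M' = (P ++ [p]) ++ M' := by simp
      by_cases hpin : p ∈ seen
      · -- skip: p is already covered by an emitted run
        rw [if_pos hpin]
        have hcov : pvCov S P p := (hseen p).mp hpin
        -- either p itself was processed before, or p is not a run start
        have hkey : p ∈ P ∨ ¬ pvGood S p := by
          obtain ⟨s, hsP, hsg, hs2, hs1, hse⟩ := hcov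
          rcases eq_or_lt_of_le hs1 with heq | hlt
          · left
            have : s = p := Prod.ext heq hs2
            rwa [← this]
          · right
            intro hg
            rcases eq_or_lt_of_le (show s.1 ≤ p.1 - 1 by omega) with heq | hlt'
            · exact hg (by rw [← hs2, ← heq]; exact hP s hsP)
            · exact hg (by rw [← hs2]; exact pyEndA_chain S s.2 S.length s.1 (p.1 - 1) hlt' (by omega))
        have hcovP : ∀ q : Int × Int, pvCov S (P ++ [p]) q ↔ pvCov S P q := by
          intro q
          rw [pvCov_append_singleton]
          constructor
          · rintro (h | ⟨hg, hrest⟩)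
            · exact h
            · rcases hkey with hmem | hng
              · exact ⟨p, hmem, hg, hrest⟩
              · exact absurd hg hng
          · exact Or.inl
        have hrunsP : runs = ((PySem.List.dedup (P ++ [p])).filter (fun r => decide (pvGood S r))).map (pvRun S) := by
          rw [pv_dedup_append_singleton]
          rcases hkey with hmem | hng
          · rw [if_pos hmem]; exact hruns
          · by_cases hmem : p ∈ P
            · rw [if_pos hmem]; exact hruns
            · rw [if_neg hmem, List.filter_append, List.map_append]
              simp only [List.filter_cons, List.filter_nil, decide_eq_true_eq]
              rw [if_neg hng]
              simpa using hruns
        rw [happend]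
        exact ih (P ++ [p]) runs seen hM' hP' hPM' hord' hpw'
          (fun q => (hseen q).trans (hcovP q).symm) hrunsP
      · -- emit: p starts a new run
        rw [if_neg hpin]
        have hncov : ¬ pvCov S P p := fun h => hpin ((hseen p).mpr h)
        have hgood : pvGood S p := by
          by_contra hng
          apply hncov
          obtain ⟨x0, hx0le, hchain, hstop⟩ := pv_exists_start S p.1 p.2 hpS
          have hx0lt : x0 < p.1 := by
            rcases eq_or_lt_of_le hx0le with heq | hlt
            · exact absurd hng (show (p.1 - 1, p.2) ∉ S by
                rw [show ((p.1 - 1, p.2) : Int × Int) = (x0 - 1, p.2) by rw [heq]]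
                exact hstop)
            · exact hlt
          have hsS : (x0, p.2) ∈ S := hchain x0 le_rfl hx0le
          have hsP : (x0, p.2) ∈ P := by
            rcases hPM (x0, p.2) hsS with h | h
            · exact h
            · exfalso
              rcases List.mem_cons.mp h with h | h
              · have := congrArg Prod.fst h; simp at this; omega
              · have := (List.pairwise_cons.mp hpw).1 _ h
                unfold pvLexLe at this; simp at this; omega
          have hend : p.1 ≤ pyEndA S p.2 x0 S.length := by
            by_contra hc
            rw [not_le] at hc
            have hge := pyEndA_ge S p.2 S.length x0
            exact pyEndA_succ_not_mem S x0 p.2 hsS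
              (hchain (pyEndA S p.2 x0 S.length + 1) (by omega) (by omega))
          exact ⟨(x0, p.2), hsP, hstop, rfl, le_of_lt hx0lt, hend⟩
        have hpnotP : p ∉ P := by
          intro hmem
          exact hncov ⟨p, hmem, hgood, rfl, le_rfl, pyEndA_ge S p.2 S.length p.1⟩
        have hseen' : ∀ q : Int × Int,
            (q ∈ (PySem.List.pyRange p.1 (pyEndA S p.2 p.1 S.length + 1) 1).foldl
                (fun s ix => PySem.Set.add s (ix, p.2)) seen) ↔ pvCov S (P ++ [p]) q := by
          intro q
          rw [PySem.Set.mem_foldl_add, pvCov_append_singleton, hseen q]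
          constructor
          · rintro (h | ⟨ix, hix, rfl⟩)
            · exact Or.inl h
            · rw [PySem.List.mem_pyRange_one] at hix
              exact Or.inr ⟨hgood, rfl, by simpa using hix.1, by simpa using by omega⟩
          · rintro (h | ⟨_, h2, h1, hend⟩)
            · exact Or.inl h
            · refine Or.inr ⟨q.1, ?_, ?_⟩
              · rw [PySem.List.mem_pyRange_one]; omega
              · rw [h2]

        have hruns' : runs ++ [(p.1, p.2, pyEndA S p.2 p.1 S.length + 1, p.2)]
            = ((PySem.List.dedup (P ++ [p])).filter (fun r => decide (pvGood S r))).map (pvRun S) := by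
          rw [pv_dedup_append_singleton, if_neg hpnotP, List.filter_append, List.map_append]
          simp only [List.filter_cons, List.filter_nil, decide_eq_true_eq]
          rw [if_pos hgood, hruns]
          rfl
        rw [happend]
        exact ih (P ++ [p]) _ _ hM' hP' hPM' hord' hpw' hseen' hruns'

theorem pv_A_char (norths : List (Int × Int)) :
    coalesce_north_edges_py norths
      = ((PySem.List.dedup (PySem.List.sorted2 norths (fun p => p.1) (fun p => p.2) false)).filter
          (fun p => decide (pvGood norths p))).map (pvRun norths) := by
  unfold coalesce_north_edges_py
  have hperm := PySem.List.sorted2_perm norths (fun p : Int × Int => p.1) (fun p : Int × Int => p.2) false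
  have := pv_foldA_inv norths
    (PySem.List.sorted2 norths (fun p => p.1) (fun p => p.2) false) [] [] PySem.Set.empty
    (fun p hp => hperm.mem_iff.mp hp)
    (by simp)
    (fun q hq => Or.inr (hperm.mem_iff.mpr hq))
    (by simp)
    ((pv_sorted2_pairwise norths _ _).imp (fun h => h))
    (by intro q; simp [pvCov, PySem.Set.empty])
    (by simp [PySem.List.dedup, PySem.Set.ofList])
  simpa using this

theorem pv_B_eq_A (norths : List (Int × Int)) :
    coalesce_north_edges_py_alt norths = coalesce_north_edges_py norths := by
  simp only [coalesce_north_edges_py_alt]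
  rw [pv_A_char]
  set S := norths
  set L := PySem.List.sorted2 S (fun p : Int × Int => p.1) (fun p : Int × Int => p.2) false with hL
  -- rewrite B's run list into the canonical filter/map form
  have hfilter : (PySem.Set.ofList S).filter (fun p => decide ((p.1 - 1, p.2) ∉ PySem.Set.ofList S))
      = (PySem.Set.ofList S).filter (fun p => decide (pvGood S p)) := by
    refine List.filter_congr ?_
    intro p _
    simp [pvGood, PySem.Set.mem_ofList]
  have hmap : ((PySem.Set.ofList S).filter (fun p => decide (pvGood S p))).map
        (fun p => (p.1, p.2, runEndB (PySem.Set.ofList S) p.2 p.1 (PySem.Set.ofList S).length + 1, p.2))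
      = ((PySem.Set.ofList S).filter (fun p => decide (pvGood S p))).map (pvRun S) := by
    refine List.map_congr_left ?_
    intro p hp
    have hpS : p ∈ S := PySem.Set.mem_ofList S p |>.mp (List.mem_of_mem_filter hp)
    unfold pvRun
    rw [runEndB_eq_pyEndA S p.1 p.2 (by simpa using hpS)]
  rw [hfilter, hmap]
  -- B's sort reproduces A's already lexicographically ordered output
  refine pv_sorted2_eq_of_perm_of_pairwise _ _ _ _ ?_ ?_
  · refine List.Perm.map _ (List.Perm.filter _ ?_)
    rw [PySem.List.dedup_eq_ofList]
    refine (List.perm_ext_iff_of_nodup (PySem.Set.nodup_ofList L) (PySem.Set.nodup_ofList S)).mpr ?_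
    intro q
    rw [PySem.Set.mem_ofList, PySem.Set.mem_ofList]
    exact (PySem.List.sorted2_perm S (fun p : Int × Int => p.1) (fun p : Int × Int => p.2) false).mem_iff
  · have hsub : (PySem.List.dedup L).Sublist L := by
      rw [PySem.List.dedup_eq_ofList]; exact pv_ofList_sublist L
    have hle : (PySem.List.dedup L).Pairwise pvLexLe :=
      ((pv_sorted2_pairwise S _ _).imp (fun h => h)).sublist hsub
    have hne : (PySem.List.dedup L).Pairwise (fun a b => a ≠ b) := by
      rw [PySem.List.dedup_eq_ofList]; exact PySem.Set.nodup_ofList L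
    have hlt : (PySem.List.dedup L).Pairwise (fun a b : Int × Int => a.1 < b.1 ∨ (a.1 = b.1 ∧ a.2 < b.2)) := by
      refine (hle.and hne).imp ?_
      rintro a b ⟨hab, hne'⟩
      rcases hab with h | ⟨h1, h2⟩
      · exact Or.inl h
      · refine Or.inr ⟨h1, lt_of_le_of_ne h2 ?_⟩
        intro h2'
        exact hne' (Prod.ext h1 h2')
    have := hlt.sublist (List.filter_sublist (p := fun p => decide (pvGood S p)))
    rw [List.pairwise_map]
    refine this.imp ?_
    intro a b hab
    simpa [pvRun] using hab


-- ===== VERDICT (by name: the statement is the Claim_ definition above) =====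
theorem coalesce_north_edges_py_spec : Claim_equal_coalesce_north_edges_py := by
  intro norths _
  unfold Spec_coalesce_north_edges_py
  exact (pv_B_eq_A norths).symm
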